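-- pv_equiv track=rewrite | github.com/dungprolhvn/PTIT-codes | dsa/DSA04013.py | solve
-- ===== SOURCE A (Python) =====
-- def solve(kangurus, size):
--     kangurus.sort()
--     rs = size
--     left = int(size/2) - 1
--     mid = int(size/2)
--     right = size - 1
--     while left >= 0 and right >= mid:
--         if kangurus[left]*2 <= kangurus[right]:
--             rs -= 1
--             left -= 1
--             right -= 1
--         else:
--             left -= 1
--     return rs
-- ===== SOURCE B (Python) =====
-- def solve(kangurus, size):
--     # Binary search for the largest number k of nestable pairs: pairing the k
--     # smallest kangaroos with the k largest works iff 2*kangurus[t] <= kangurus[size-k+t]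
--     # for all t < k, and feasibility is monotone in k.  (Sorts kangurus in place, like A.)
--     kangurus.sort()
--     mid = size // 2
--     lo, hi = 0, mid
--     while lo < hi:
--         k = (lo + hi + 1) // 2
--         if all(2 * kangurus[t] <= kangurus[size - k + t] for t in range(k)):
--             lo = k
--         else:
--             hi = k - 1
--     return size - lo
-- ===== Notes on version B (the rewrite author's own statement) =====
-- stated objective: alternative
-- what changed: A's converging two-pointer greedy over the lower/upper halves is replaced by a binary search for the largest k such that the k smallest kangaroos nest position-wise into the k largest (a monotone feasibility predicate), returning size minus that k; both still sort kangurus in place.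
import Mathlib
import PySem

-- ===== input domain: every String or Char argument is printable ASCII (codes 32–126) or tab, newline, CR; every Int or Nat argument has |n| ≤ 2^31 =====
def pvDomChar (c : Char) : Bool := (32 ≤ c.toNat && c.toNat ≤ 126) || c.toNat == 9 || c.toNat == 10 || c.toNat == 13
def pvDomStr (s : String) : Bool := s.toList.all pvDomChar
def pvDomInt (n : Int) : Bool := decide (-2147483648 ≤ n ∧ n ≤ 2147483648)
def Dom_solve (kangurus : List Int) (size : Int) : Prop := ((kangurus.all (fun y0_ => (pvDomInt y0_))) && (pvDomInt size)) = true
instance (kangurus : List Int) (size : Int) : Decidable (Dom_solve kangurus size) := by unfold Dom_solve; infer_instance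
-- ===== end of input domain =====

-- B replaces A's converging two-pointer greedy by a binary search for the largest
-- feasible number of nestable pairs (objective: alternative algorithm, same O(n log n) cost).
-- Both Pythons sort `kangurus` in place (same side effect); equivalence here is about the return value.

-- ===== PORT A =====
-- A's while loop: two pointers walking down from the middle and the end of the sorted list.
def solveLoop (s : List Int) (mid left right rs : Int) : Int :=
  if h : left ≥ 0 ∧ right ≥ mid then
    if PySem.List.pyGetD s left 0 * 2 ≤ PySem.List.pyGetD s right 0 then
      solveLoop s mid (left - 1) (right - 1) (rs - 1)
    else
      solveLoop s mid (left - 1) right rs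
  else rs
termination_by (left + 1).toNat
decreasing_by all_goals omega

def solve (kangurus : List Int) (size : Int) : Int :=
  let s := PySem.List.sorted kangurus (fun x => x) false  -- kangurus.sort()
  let rs := size
  let left := PySem.Int.truncdiv size 2 - 1               -- int(size/2) - 1 (exact: |size| ≤ 2^31 < 2^53)
  let mid := PySem.Int.truncdiv size 2
  let right := size - 1
  solveLoop s mid left right rs

-- ===== PORT B =====
-- all(2*kangurus[t] <= kangurus[size-k+t] for t in range(k))
def altCheck (s : List Int) (size k : Int) : Bool :=
  (PySem.List.pyRange 0 k 1).all
    (fun t => decide (2 * PySem.List.pyGetD s t 0 ≤ PySem.List.pyGetD s (size - k + t) 0))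

-- B's binary-search loop over k ∈ [lo, hi]
def altLoop (s : List Int) (size lo hi : Int) : Int :=
  if h : lo < hi then
    let k := PySem.Int.floordiv (lo + hi + 1) 2
    if altCheck s size k then altLoop s size k hi
    else altLoop s size lo (k - 1)
  else lo
termination_by (hi - lo).toNat
decreasing_by
  all_goals
    simp only [PySem.Int.floordiv_eq_ediv_of_pos (by norm_num : (0:Int) < 2)] at *
    omega

def solve_alt (kangurus : List Int) (size : Int) : Int :=
  let s := PySem.List.sorted kangurus (fun x => x) false  -- kangurus.sort()
  let mid := PySem.Int.floordiv size 2
  size - altLoop s size 0 mid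

-- ===== PRECONDITION & SPEC =====
-- Pre_ excludes exactly the inputs with size ≥ 2 and size > len(kangurus), on which A raises IndexError.
def Pre_solve (kangurus : List Int) (size : Int) : Prop :=
  size ≤ (kangurus.length : Int) ∨ size ≤ 1
instance (kangurus : List Int) (size : Int) : Decidable (Pre_solve kangurus size) := by
  unfold Pre_solve; infer_instance

def pvWitness_solve : List Int × Int := ([1, 2, 3, 8], 4)

def Spec_solve (kangurus : List Int) (size : Int) (out : Int) : Prop := out = solve_alt kangurus size
instance (kangurus : List Int) (size : Int) (out : Int) : Decidable (Spec_solve kangurus size out) := by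
  unfold Spec_solve; infer_instance

-- ===== CLAIM (what is proved, stated in full; the proofs are below) =====
def Claim_equal_solve : Prop := ∀ (kangurus : List Int) (size : Int), Dom_solve kangurus size → Pre_solve kangurus size → Spec_solve kangurus size (solve kangurus size)

-- ===== LEMMAS AND PROOFS =====

-- feasB lo up k: the k smallest elements of `lo` nest into the k largest of `up` position-wise.
def feasB (lo up : List Int) (k : Nat) : Bool :=
  decide (k ≤ lo.length) && decide (k ≤ up.length) &&
    (List.range k).all (fun t => decide (2 * lo.getD t 0 ≤ up.getD (up.length - k + t) 0))

-- the largest feasible k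
def maxk (lo up : List Int) : Nat :=
  Nat.findGreatest (fun k => feasB lo up k = true) (min lo.length up.length)

-- A's greedy, as structural recursion over the two halves read from the top (reversed lists).
def mr : List Int → List Int → Nat
  | [], _ => 0
  | _ :: _, [] => 0
  | a :: rlo, b :: rup => if 2 * a ≤ b then mr rlo rup + 1 else mr rlo (b :: rup)

lemma feasB_iff (lo up : List Int) (k : Nat) :
    feasB lo up k = true ↔
      k ≤ lo.length ∧ k ≤ up.length ∧
        ∀ t, t < k → 2 * lo.getD t 0 ≤ up.getD (up.length - k + t) 0 := by
  simp [feasB, List.all_eq_true, List.mem_range, and_assoc]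

lemma feasB_zero (lo up : List Int) : feasB lo up 0 = true := by
  simp [feasB]

lemma sorted_getD_le (up : List Int) (hup : up.Pairwise (· ≤ ·)) {i j : Nat}
    (hij : i ≤ j) (hj : j < up.length) : up.getD i 0 ≤ up.getD j 0 := by
  rcases Nat.lt_or_ge i j with h | h
  · rw [List.getD_eq_getElem up 0 (by omega), List.getD_eq_getElem up 0 hj]
    exact List.pairwise_iff_getElem.mp hup i j (by omega) hj h
  · have : i = j := by omega
    subst this; rfl

lemma feasB_antitone (lo up : List Int) (hup : up.Pairwise (· ≤ ·)) {j k : Nat}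
    (hjk : j ≤ k) (hk : feasB lo up k = true) : feasB lo up j = true := by
  rw [feasB_iff] at hk ⊢
  obtain ⟨h1, h2, h3⟩ := hk
  refine ⟨by omega, by omega, fun t ht => ?_⟩
  have := h3 t (by omega)
  have hle : up.getD (up.length - k + t) 0 ≤ up.getD (up.length - j + t) 0 :=
    sorted_getD_le up hup (by omega) (by omega)
  omega

lemma maxk_feas (lo up : List Int) : feasB lo up (maxk lo up) = true := by
  rw [maxk]
  exact Nat.findGreatest_spec (P := fun k => feasB lo up k = true) (Nat.zero_le _) (feasB_zero lo up)

lemma maxk_le (lo up : List Int) : maxk lo up ≤ min lo.length up.length :=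
  Nat.findGreatest_le _

lemma le_maxk (lo up : List Int) {k : Nat} (hk : feasB lo up k = true) : k ≤ maxk lo up := by
  have h := (feasB_iff lo up k).mp hk
  exact Nat.le_findGreatest (by omega) hk

lemma getD_snoc_lt (xs : List Int) (x : Int) {t : Nat} (h : t < xs.length) :
    (xs ++ [x]).getD t 0 = xs.getD t 0 :=
  List.getD_append xs [x] 0 t h

lemma getD_snoc_len (xs : List Int) (x : Int) : (xs ++ [x]).getD xs.length 0 = x := by
  rw [List.getD_append_right xs [x] 0 xs.length (le_refl _)]
  simp

lemma maxk_snoc_pair (lo up : List Int) (a b : Int)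
    (ha : ∀ x ∈ lo, x ≤ a) (hab : 2 * a ≤ b) :
    maxk (lo ++ [a]) (up ++ [b]) = maxk lo up + 1 := by
  have hm := (feasB_iff lo up _).mp (maxk_feas lo up)
  have hle := maxk_le lo up
  rw [maxk, Nat.findGreatest_eq_iff]
  refine ⟨by simp; omega, fun _ => ?_, fun n hn hnb hfn => ?_⟩
  · -- feasB (lo ++ [a]) (up ++ [b]) (maxk lo up + 1)
    rw [feasB_iff]
    refine ⟨by simp; omega, by simp; omega, fun t ht => ?_⟩
    simp only [List.length_append, List.length_cons, List.length_nil]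
    rcases Nat.lt_or_ge t (maxk lo up) with h | h
    · have h1 : t < lo.length := by omega
      have h2 : up.length + 1 - (maxk lo up + 1) + t = up.length - maxk lo up + t := by omega
      have h3 : up.length - maxk lo up + t < up.length := by omega
      rw [getD_snoc_lt lo a h1, h2, getD_snoc_lt up b h3]
      exact hm.2.2 t h
    · have ht' : t = maxk lo up := by omega
      have h2 : up.length + 1 - (maxk lo up + 1) + t = up.length := by omega
      rw [h2, getD_snoc_len up b]
      rcases Nat.lt_or_ge t lo.length with h1 | h1
      · rw [getD_snoc_lt lo a h1]
        have hmem : lo.getD t 0 ∈ lo := by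
          rw [List.getD_eq_getElem lo 0 h1]; exact List.getElem_mem h1
        have : lo.getD t 0 ≤ a := ha _ hmem
        omega
      · have ht2 : t = lo.length := by omega
        subst ht2
        rw [getD_snoc_len lo a]
        omega
  · -- no larger n is feasible
    have hf := (feasB_iff _ _ n).mp hfn
    have hq : n ≤ up.length + 1 := by
      have := hf.2.1; simpa using this
    have hp : n ≤ lo.length + 1 := by
      have := hf.1; simpa using this
    have : feasB lo up (n - 1) = true := by
      rw [feasB_iff]
      refine ⟨by omega, by omega, fun t ht => ?_⟩
      have h1 : t < lo.length := by omega
      have h2 := hf.2.2 t (by omega)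
      simp only [List.length_append, List.length_cons, List.length_nil] at h2
      rw [getD_snoc_lt lo a h1] at h2
      have h3 : up.length + 1 - n + t = up.length - (n - 1) + t := by omega
      have h4 : up.length + 1 - n + t < up.length := by omega
      rw [h3] at h2
      rw [getD_snoc_lt up b (by omega)] at h2
      exact h2
    have := le_maxk lo up this
    omega

lemma maxk_snoc_skip (lo up : List Int) (a b : Int) (hab : ¬ 2 * a ≤ b) :
    maxk (lo ++ [a]) (up ++ [b]) = maxk lo (up ++ [b]) := by
  have hm := (feasB_iff lo (up ++ [b]) _).mp (maxk_feas lo (up ++ [b]))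
  have hle := maxk_le lo (up ++ [b])
  rw [maxk, Nat.findGreatest_eq_iff]
  simp only [List.length_append, List.length_cons, List.length_nil] at hle ⊢
  refine ⟨by omega, fun _ => ?_, fun n hn hnb hfn => ?_⟩
  · rw [feasB_iff]
    refine ⟨by simp; omega, by simp; omega, fun t ht => ?_⟩
    have h1 : t < lo.length := by omega
    rw [getD_snoc_lt lo a h1]
    exact hm.2.2 t ht
  · have hf := (feasB_iff _ _ n).mp hfn
    simp only [List.length_append, List.length_cons, List.length_nil] at hf
    rcases Nat.lt_or_ge n (lo.length + 1) with h1 | h1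
    · -- n ≤ lo.length: then feasible for (lo, up ++ [b]) too
      have : feasB lo (up ++ [b]) n = true := by
        rw [feasB_iff]
        refine ⟨by omega, by simp; omega, fun t ht => ?_⟩
        have h2 := hf.2.2 t ht
        rw [getD_snoc_lt lo a (by omega)] at h2
        simpa using h2
      have := le_maxk lo (up ++ [b]) this
      omega
    · -- n = lo.length + 1: the pair (a, b) itself would have to nest
      have hn2 : n = lo.length + 1 := by omega
      have h2 := hf.2.2 lo.length (by omega)
      rw [getD_snoc_len lo a] at h2
      have h3 : up.length + 1 - n + lo.length = up.length := by omega
      rw [h3, getD_snoc_len up b] at h2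
      omega

lemma maxk_nil_left (up : List Int) : maxk [] up = 0 := by
  simp [maxk]

lemma maxk_nil_right (lo : List Int) : maxk lo [] = 0 := by
  simp [maxk]

lemma mr_nil_right (rlo : List Int) : mr rlo [] = 0 := by
  cases rlo <;> rfl

lemma mr_eq_maxk : ∀ (rlo rup : List Int), rlo.Pairwise (fun x y => y ≤ x) →
    mr rlo rup = maxk rlo.reverse rup.reverse := by
  intro rlo
  induction rlo with
  | nil => intro rup _; rw [mr, List.reverse_nil, maxk_nil_left]
  | cons a rlo ih =>
    intro rup hpw
    rw [List.pairwise_cons] at hpw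
    cases rup with
    | nil => rw [mr_nil_right, List.reverse_nil, maxk_nil_right]
    | cons b rup =>
      have ha : ∀ x ∈ rlo.reverse, x ≤ a := fun x hx => hpw.1 x (List.mem_reverse.mp hx)
      rw [mr, List.reverse_cons, List.reverse_cons]
      by_cases hc : 2 * a ≤ b
      · rw [if_pos hc, ih rup hpw.2, maxk_snoc_pair _ _ _ _ ha hc]
      · rw [if_neg hc, ih (b :: rup) hpw.2, List.reverse_cons, maxk_snoc_skip _ _ _ _ hc]

lemma solveLoop_eq (s : List Int) (mid left right rs : Int)
    (h0 : 0 ≤ mid) (hl : left < mid) (hr : right < (s.length : Int)) :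
    solveLoop s mid left right rs =
      rs - mr ((s.take (left + 1).toNat).reverse)
              (((s.take (right + 1).toNat).drop mid.toNat).reverse) := by
  rw [solveLoop]
  by_cases h : left ≥ 0 ∧ right ≥ mid
  · rw [dif_pos h]
    have hllen : left < (s.length : Int) := by omega
    have hlt : left.toNat < s.length := by omega
    have hrt : right.toNat < s.length := by omega
    have hmr : mid.toNat ≤ right.toNat := by omega
    have e1 : (left + 1).toNat = left.toNat + 1 := by omega
    have e2 : (right + 1).toNat = right.toNat + 1 := by omega
    have eg1 : PySem.List.pyGetD s left 0 = s[left.toNat] :=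
      PySem.List.pyGetD_eq_getElem s 0 h.1 hllen
    have eg2 : PySem.List.pyGetD s right 0 = s[right.toNat] :=
      PySem.List.pyGetD_eq_getElem s 0 (by omega) hr
    have et1 : s.take (left.toNat + 1) = s.take left.toNat ++ [s[left.toNat]] := by
      rw [List.take_add_one, List.getElem?_eq_getElem hlt]; rfl
    have et2 : (s.take (right.toNat + 1)).drop mid.toNat =
        (s.take right.toNat).drop mid.toNat ++ [s[right.toNat]] := by
      rw [List.take_add_one, List.getElem?_eq_getElem hrt]
      exact List.drop_append_of_le_length (by simp; omega)
    rw [e1, e2, et1, et2, List.reverse_append, List.reverse_append]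
    simp only [List.reverse_singleton, List.singleton_append, mr]
    by_cases hc : 2 * s[left.toNat] ≤ s[right.toNat]
    · rw [if_pos hc, eg1, eg2, if_pos (by omega)]
      rw [solveLoop_eq s mid (left - 1) (right - 1) (rs - 1) h0 (by omega) (by omega)]
      have e3 : left - 1 + 1 = left := by ring
      have e4 : right - 1 + 1 = right := by ring
      rw [e3, e4]
      push_cast
      ring
    · rw [if_neg hc, eg1, eg2, if_neg (by omega)]
      rw [solveLoop_eq s mid (left - 1) right rs h0 (by omega) hr]
      have e3 : left - 1 + 1 = left := by ring
      rw [e3, e2, et2, List.reverse_append]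
      simp only [List.reverse_singleton, List.singleton_append]
  · rw [dif_neg h]
    rcases not_and_or.mp h with h1 | h1
    · have : (left + 1).toNat = 0 := by omega
      rw [this]
      simp [mr]
    · have : ((s.take (right + 1).toNat).drop mid.toNat) = [] :=
        List.drop_eq_nil_of_le (by simp; omega)
      rw [this, List.reverse_nil, mr_nil_right]
      simp
termination_by (left + 1).toNat
decreasing_by all_goals omega

lemma altLoop_eq (s : List Int) (size : Int) (M : Nat)
    (hfeas : ∀ k : Nat, (k : Int) ≤ PySem.Int.floordiv size 2 →
        (altCheck s size (k : Int) = true ↔ feasB (s.take (PySem.Int.floordiv size 2).toNat)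
          ((s.take size.toNat).drop (PySem.Int.floordiv size 2).toNat) k = true))
    (hM : M = maxk (s.take (PySem.Int.floordiv size 2).toNat)
          ((s.take size.toNat).drop (PySem.Int.floordiv size 2).toNat))
    (hup : ((s.take size.toNat).drop (PySem.Int.floordiv size 2).toNat).Pairwise (· ≤ ·))
    (lo hi : Int) (hlo0 : 0 ≤ lo) (h1 : lo ≤ (M : Int)) (h2 : (M : Int) ≤ hi)
    (h3 : hi ≤ PySem.Int.floordiv size 2) :
    altLoop s size lo hi = M := by
  rw [altLoop]
  by_cases h : lo < hi
  · rw [dif_pos h]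
    have hk2 : PySem.Int.floordiv (lo + hi + 1) 2 = (lo + hi + 1) / 2 :=
      PySem.Int.floordiv_eq_ediv_of_pos (by norm_num)
    have hkb : lo + 1 ≤ PySem.Int.floordiv (lo + hi + 1) 2 ∧
        PySem.Int.floordiv (lo + hi + 1) 2 ≤ hi := by rw [hk2]; omega
    set k := PySem.Int.floordiv (lo + hi + 1) 2 with hkdef
    have hknn : 0 ≤ k := by omega
    have hkc : ((k.toNat : Int)) = k := by omega
    by_cases hc : altCheck s size k = true
    · rw [if_pos hc]
      have hfk : feasB (s.take (PySem.Int.floordiv size 2).toNat)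
          ((s.take size.toNat).drop (PySem.Int.floordiv size 2).toNat) k.toNat = true := by
        rw [← (hfeas k.toNat (by omega))]
        rwa [hkc]
      have hkM : k.toNat ≤ M := hM ▸ le_maxk _ _ hfk
      exact altLoop_eq s size M hfeas hM hup k hi (by omega) (by omega) h2 h3
    · rw [if_neg hc]
      have hMk : (M : Int) < k := by
        by_contra hcon
        push Not at hcon
        have hfM : feasB (s.take (PySem.Int.floordiv size 2).toNat)
            ((s.take size.toNat).drop (PySem.Int.floordiv size 2).toNat) M = true :=
          hM ▸ maxk_feas _ _
        have hfk : feasB (s.take (PySem.Int.floordiv size 2).toNat)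
            ((s.take size.toNat).drop (PySem.Int.floordiv size 2).toNat) k.toNat = true :=
          feasB_antitone _ _ hup (by omega) hfM
        rw [← (hfeas k.toNat (by omega))] at hfk
        rw [hkc] at hfk
        exact hc hfk
      exact altLoop_eq s size M hfeas hM hup lo (k - 1) hlo0 h1 (by omega) (by omega)
  · rw [dif_neg h]
    omega
termination_by (hi - lo).toNat
decreasing_by all_goals omega

lemma getD_take (s : List Int) {n t : Nat} (h : t < n) (h2 : t < s.length) :
    (s.take n).getD t 0 = s.getD t 0 := by
  rw [List.getD_eq_getElem _ _ (by simp [List.length_take]; omega),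
      List.getD_eq_getElem _ _ h2, List.getElem_take]

lemma getD_drop_take (s : List Int) {n m i : Nat} (h1 : m + i < n) (h2 : n ≤ s.length) :
    ((s.take n).drop m).getD i 0 = s.getD (m + i) 0 := by
  rw [List.getD_eq_getElem _ _ (by simp [List.length_drop, List.length_take]; omega),
      List.getD_eq_getElem _ _ (by omega), List.getElem_drop, List.getElem_take]

lemma altCheck_iff (s : List Int) (size : Int) (hs : 0 ≤ size) (hlen : size ≤ (s.length : Int))
    (k : Nat) (hk : (k : Int) ≤ PySem.Int.floordiv size 2) :
    altCheck s size (k : Int) = true ↔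
      feasB (s.take (PySem.Int.floordiv size 2).toNat)
        ((s.take size.toNat).drop (PySem.Int.floordiv size 2).toNat) k = true := by
  have hm2 : PySem.Int.floordiv size 2 = size / 2 :=
    PySem.Int.floordiv_eq_ediv_of_pos (by norm_num)
  rw [hm2] at hk ⊢
  have hm0 : (0:Int) ≤ size / 2 := by omega
  have hmsz : 2 * (size / 2) ≤ size := by omega
  have hp : (s.take (size / 2).toNat).length = (size / 2).toNat := by
    rw [List.length_take]; omega
  have hq : ((s.take size.toNat).drop (size / 2).toNat).length = size.toNat - (size / 2).toNat := by
    rw [List.length_drop, List.length_take]; omega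
  rw [feasB_iff, hp, hq]
  unfold altCheck
  rw [List.all_eq_true]
  constructor
  · intro hall
    refine ⟨by omega, by omega, fun t ht => ?_⟩
    have h := hall (t : Int) (by rw [PySem.List.mem_pyRange_one]; omega)
    rw [decide_eq_true_iff,
        PySem.List.pyGetD_eq_getElem s 0 (by omega) (by omega),
        PySem.List.pyGetD_eq_getElem s 0 (by omega) (by omega),
        ← List.getD_eq_getElem s 0, ← List.getD_eq_getElem s 0] at h
    rw [getD_take s (by omega) (by omega),
        getD_drop_take s (by omega) (by omega)]
    have e1 : ((t : Int)).toNat = t := by omega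
    have e2 : (size - (k:Int) + (t:Int)).toNat = size.toNat - k + t := by omega
    have e3 : (size / 2).toNat + (size.toNat - (size / 2).toNat - k + t) = size.toNat - k + t := by
      omega
    rw [e1, e2] at h
    rw [e3]
    exact h
  · rintro ⟨hk1, hk2, hall⟩ t htmem
    rw [PySem.List.mem_pyRange_one] at htmem
    have h := hall t.toNat (by omega)
    rw [getD_take s (by omega) (by omega),
        getD_drop_take s (by omega) (by omega)] at h
    rw [decide_eq_true_iff,
        PySem.List.pyGetD_eq_getElem s 0 (by omega) (by omega),
        PySem.List.pyGetD_eq_getElem s 0 (by omega) (by omega),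
        ← List.getD_eq_getElem s 0, ← List.getD_eq_getElem s 0]
    have e2 : (size - (k:Int) + t).toNat = size.toNat - k + t.toNat := by omega
    have e3 : (size / 2).toNat + (size.toNat - (size / 2).toNat - k + t.toNat) =
        size.toNat - k + t.toNat := by omega
    rw [e2]
    rw [e3] at h
    exact h

lemma tdiv2_nonpos {a : Int} (h : a ≤ 1) : PySem.Int.truncdiv a 2 ≤ 0 := by
  have hsgn : (2:Int).sign = 1 := rfl
  simp only [PySem.Int.truncdiv, Int.tdiv_eq_ediv, hsgn]
  split_ifs <;> omega

lemma tdiv2_of_nonneg {a : Int} (h : 0 ≤ a) : PySem.Int.truncdiv a 2 = a / 2 :=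
  Int.tdiv_eq_ediv_of_nonneg h

-- ===== VERDICT (by name: the statement is the Claim_ definition above) =====
theorem solve_spec : Claim_equal_solve := by
  unfold Claim_equal_solve Spec_solve Pre_solve
  intro kangurus size hdom hpre
  simp only [solve, solve_alt]
  set s := PySem.List.sorted kangurus (fun x => x) false with hsdef
  have hslen : (s.length : Int) = (kangurus.length : Int) := by
    rw [hsdef, PySem.List.length_sorted]
  have hfd : PySem.Int.floordiv size 2 = size / 2 :=
    PySem.Int.floordiv_eq_ediv_of_pos (by norm_num)
  by_cases hsz : size ≤ 1
  · -- size ≤ 1: both loops exit immediately and both return size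
    have h1 : PySem.Int.truncdiv size 2 ≤ 0 := tdiv2_nonpos hsz
    rw [solveLoop, dif_neg (by omega), altLoop, hfd, dif_neg (by omega)]
    omega
  · -- 2 ≤ size (so, by Pre_, size ≤ len): the two loops compute size minus the same maximum k
    have hpre' : size ≤ (kangurus.length : Int) := by omega
    have hlen : size ≤ (s.length : Int) := by omega
    have htd : PySem.Int.truncdiv size 2 = size / 2 := tdiv2_of_nonneg (by omega)
    have hm0 : (0:Int) ≤ size / 2 := by omega
    have hm2 : 2 * (size / 2) ≤ size := by omega
    have hmlt : size / 2 ≤ size - 1 := by omega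
    have hpw : s.Pairwise (· ≤ ·) := by
      rw [hsdef]; exact PySem.List.sorted_pairwise kangurus (fun x => x)
    -- A's loop = size - (the greedy pairing count) = size - maxk
    rw [htd, solveLoop_eq s (size / 2) (size / 2 - 1) (size - 1) size hm0 (by omega) (by omega)]
    have e1 : size / 2 - 1 + 1 = size / 2 := by ring
    have e2 : size - 1 + 1 = size := by ring
    rw [e1, e2]
    have hpwlo : ((s.take (size / 2).toNat).reverse).Pairwise (fun x y => y ≤ x) := by
      rw [List.pairwise_reverse]
      exact List.Pairwise.sublist (List.take_sublist _ _) hpw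
    rw [mr_eq_maxk _ _ hpwlo, List.reverse_reverse, List.reverse_reverse]
    -- B's binary search = maxk
    have hup : ((s.take size.toNat).drop (PySem.Int.floordiv size 2).toNat).Pairwise (· ≤ ·) :=
      List.Pairwise.sublist (List.drop_sublist _ _)
        (List.Pairwise.sublist (List.take_sublist _ _) hpw)
    have hMle : (maxk (s.take (PySem.Int.floordiv size 2).toNat)
        ((s.take size.toNat).drop (PySem.Int.floordiv size 2).toNat) : Int) ≤
          PySem.Int.floordiv size 2 := by
      have h := maxk_le (s.take (PySem.Int.floordiv size 2).toNat)
        ((s.take size.toNat).drop (PySem.Int.floordiv size 2).toNat)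
      have hp : (s.take (PySem.Int.floordiv size 2).toNat).length =
          (PySem.Int.floordiv size 2).toNat := by
        rw [List.length_take, hfd]; omega
      rw [hp] at h
      omega
    have hB : altLoop s size 0 (PySem.Int.floordiv size 2) =
        (maxk (s.take (PySem.Int.floordiv size 2).toNat)
          ((s.take size.toNat).drop (PySem.Int.floordiv size 2).toNat) : Int) :=
      altLoop_eq s size _ (fun k hk => altCheck_iff s size (by omega) hlen k hk) rfl hup
        0 (PySem.Int.floordiv size 2) (le_refl 0) (by positivity) hMle (le_refl _)
    rw [hB, hfd]
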